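-- pv_equiv track=rewrite | github.com/zhangbin2025/weiqi-skills | weiqi-sgf/scripts/replay.py | _unescape
-- ===== SOURCE A (Python) =====
-- def _unescape(content):
--     """处理 SGF 转义字符"""
--     result = []
--     i = 0
--     while i < len(content):
--         if content[i] == '\\' and i + 1 < len(content):
--             next_char = content[i + 1]
--             if next_char == '\\':
--                 result.append('\\')
--                 i += 2
--             elif next_char == ']':
--                 result.append(']')
--                 i += 2
--             elif next_char == 'n':
--                 result.append('\n')
--                 i += 2
--             elif next_char == 'r':
--                 result.append('\r')
--                 i += 2
--             elif next_char == 't':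
--                 result.append('\t')
--                 i += 2
--             else:
--                 result.append(next_char)
--                 i += 2
--         else:
--             result.append(content[i])
--             i += 1
--     return ''.join(result)
-- ===== SOURCE B (Python) =====
-- import re
--
-- _MAP = {'\\': '\\', ']': ']', 'n': '\n', 'r': '\r', 't': '\t'}
-- _PAT = re.compile(r'\\(.)', re.DOTALL)
--
--
-- def _unescape(content):
--     """处理 SGF 转义字符"""
--     return _PAT.sub(lambda m: _MAP.get(m.group(1), m.group(1)), content)
-- ===== Notes on version B (the rewrite author's own statement) =====
-- stated objective: idiomatic
-- what changed: Replaced the hand-written index loop over the string with a single precompiled regex substitution: re.sub(r'\\(.)', DOTALL) finds each backslash-plus-character pair and substitutes through a small lookup table; a trailing lone backslash never matches and stays literal, as in A.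
import Mathlib
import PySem

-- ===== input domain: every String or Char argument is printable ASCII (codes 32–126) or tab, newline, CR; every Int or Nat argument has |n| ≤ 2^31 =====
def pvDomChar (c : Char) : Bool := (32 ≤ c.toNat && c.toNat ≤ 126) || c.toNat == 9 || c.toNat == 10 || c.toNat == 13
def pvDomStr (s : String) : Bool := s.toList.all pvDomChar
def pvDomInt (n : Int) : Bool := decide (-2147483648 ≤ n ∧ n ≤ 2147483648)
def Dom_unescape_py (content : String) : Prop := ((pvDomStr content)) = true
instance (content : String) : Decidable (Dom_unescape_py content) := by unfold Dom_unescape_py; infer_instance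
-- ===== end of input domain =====

-- B replaces A's index loop by a table-driven regex substitution (idiomatic, same cost).

-- ===== PORT A =====
-- literal port of A's while loop: index i, result list of appended characters, ''.join at the end
def unescapeA_go (cs : List Char) (i : Nat) (result : List Char) : List Char :=
  if hi : i < cs.length then
    if h2 : cs[i] = '\\' ∧ i + 1 < cs.length then
      let next := cs[i + 1]
      if next = '\\' then unescapeA_go cs (i + 2) (result ++ ['\\'])
      else if next = ']' then unescapeA_go cs (i + 2) (result ++ [']'])
      else if next = 'n' then unescapeA_go cs (i + 2) (result ++ ['\n'])
      else if next = 'r' then unescapeA_go cs (i + 2) (result ++ ['\r'])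
      else if next = 't' then unescapeA_go cs (i + 2) (result ++ ['\t'])
      else unescapeA_go cs (i + 2) (result ++ [next])
    else unescapeA_go cs (i + 1) (result ++ [cs[i]])
  else result
termination_by cs.length - i

def unescape_py (content : String) : String :=
  String.ofList (unescapeA_go content.toList 0 [])

-- ===== PORT B =====
-- Source B's table _MAP = {'\\':'\\', ']':']', 'n':'\n', 'r':'\r', 't':'\t'} (group(1) is one char, so Char → Char)
def sgfMap : PySem.Dict Char Char :=
  ⟨[('\\', '\\'), (']', ']'), ('n', '\n'), ('r', '\r'), ('t', '\t')]⟩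

-- hand-port of re.sub with pattern r'\\(.)' and re.DOTALL: a leftmost non-overlapping match is
-- exactly a backslash followed by any one character (DOTALL: '.' includes '\n'), replaced by
-- _MAP.get(group(1), group(1)); unmatched text — any other character, or a trailing lone
-- backslash — is copied unchanged. Exact for this pattern.
def subEscape (cs : List Char) : List Char :=
  match cs with
  | [] => []
  | c :: rest =>
    if c = '\\' then
      match rest with
      | c2 :: rest2 => sgfMap.getD c2 c2 :: subEscape rest2
      | [] => ['\\']
    else c :: subEscape rest

def unescape_py_alt (content : String) : String :=
  String.ofList (subEscape content.toList)

-- ===== PRECONDITION & SPEC =====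
def Spec_unescape_py (content : String) (out : String) : Prop := out = unescape_py_alt content
instance (content : String) (out : String) : Decidable (Spec_unescape_py content out) := by unfold Spec_unescape_py; infer_instance

-- ===== CLAIM (what is proved, stated in full; the proofs are below) =====
def Claim_equal_unescape_py : Prop := ∀ (content : String), Dom_unescape_py content → Spec_unescape_py content (unescape_py content)

-- ===== LEMMAS AND PROOFS =====

lemma subEscape_cons_of_ne (c : Char) (rest : List Char) (hc : ¬ c = '\\') :
    subEscape (c :: rest) = c :: subEscape rest := by
  rw [subEscape.eq_def]
  simp [hc]

lemma loopA_eq (cs : List Char) (i : Nat) (acc : List Char) :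
    unescapeA_go cs i acc = acc ++ subEscape (cs.drop i) := by
  fun_induction unescapeA_go cs i acc with
  | case1 i acc hi h2 next h ih =>
      have h' : cs[i+1] = '\\' := h
      rw [ih, List.drop_eq_getElem_cons hi, List.drop_eq_getElem_cons h2.2]
      simp [subEscape, h2.1, h', sgfMap, PySem.Dict.getD_eq_get?_getD, PySem.Dict.get?_mk_cons]
  | case2 i acc hi h2 next h1 h ih =>
      have h' : cs[i+1] = ']' := h
      rw [ih, List.drop_eq_getElem_cons hi, List.drop_eq_getElem_cons h2.2]
      simp [subEscape, h2.1, h', sgfMap, PySem.Dict.getD_eq_get?_getD, PySem.Dict.get?_mk_cons]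
  | case3 i acc hi h2 next h1 h2' h ih =>
      have h' : cs[i+1] = 'n' := h
      rw [ih, List.drop_eq_getElem_cons hi, List.drop_eq_getElem_cons h2.2]
      simp [subEscape, h2.1, h', sgfMap, PySem.Dict.getD_eq_get?_getD, PySem.Dict.get?_mk_cons]
  | case4 i acc hi h2 next h1 h2' h3 h ih =>
      have h' : cs[i+1] = 'r' := h
      rw [ih, List.drop_eq_getElem_cons hi, List.drop_eq_getElem_cons h2.2]
      simp [subEscape, h2.1, h', sgfMap, PySem.Dict.getD_eq_get?_getD, PySem.Dict.get?_mk_cons]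
  | case5 i acc hi h2 next h1 h2' h3 h4 h ih =>
      have h' : cs[i+1] = 't' := h
      rw [ih, List.drop_eq_getElem_cons hi, List.drop_eq_getElem_cons h2.2]
      simp [subEscape, h2.1, h', sgfMap, PySem.Dict.getD_eq_get?_getD, PySem.Dict.get?_mk_cons]
  | case6 i acc hi h2 next h1 h2' h3 h4 h5 ih =>
      have n1 : cs[i+1] ≠ '\\' := h1
      have n2 : cs[i+1] ≠ ']' := h2'
      have n3 : cs[i+1] ≠ 'n' := h3
      have n4 : cs[i+1] ≠ 'r' := h4
      have n5 : cs[i+1] ≠ 't' := h5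
      rw [ih, List.drop_eq_getElem_cons hi, List.drop_eq_getElem_cons h2.2]
      simp [subEscape, h2.1, sgfMap, PySem.Dict.getD_eq_get?_getD, PySem.Dict.get?_mk_cons,
            Ne.symm n1, Ne.symm n2, Ne.symm n3, Ne.symm n4, Ne.symm n5]
      simp [PySem.Dict.get?]
      rfl
  | case7 i acc hi h2 ih =>
      rw [ih, List.drop_eq_getElem_cons hi]
      by_cases hc : cs[i] = '\\'
      · have hlen : cs.length ≤ i + 1 := by
          by_contra hlt; exact h2 ⟨hc, by omega⟩
        rw [List.drop_eq_nil_of_le hlen]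
        simp [subEscape, hc]
      · rw [subEscape_cons_of_ne _ _ hc]
        simp
  | case8 i acc hi =>
      rw [List.drop_eq_nil_of_le (by omega)]
      simp [subEscape]

-- ===== VERDICT (by name: the statement is the Claim_ definition above) =====
theorem unescape_py_spec : Claim_equal_unescape_py := by
  intro content _
  unfold Spec_unescape_py unescape_py unescape_py_alt
  rw [loopA_eq]
  simp
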